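-- pv_equiv track=rewrite | github.com/BramDevlaminck/DiscreteAlgorithmsCombinatorialGeneration | integer_partitions.py | enum_partitions2
-- ===== SOURCE A (Python) =====
-- def enum_partitions2(m: int):
--     """
--     Algorithm 3.6
--
--     (results are different from in paper,
--     but same from here on wikipedia: https://en.wikipedia.org/wiki/Partition_function_(number_theory)
--     => mistake in paper, if we sum the rows of enum_partitions function we get the same result as here
--     """
--     p = [1]  # P(1) = 1
--
--     for i in range(1, m + 1):
--         sign = 1
--         sum_total = 0
--         w = 1
--         j = 1
--         wj = w + j
--         while w < i + 1:
--             sum_total += sign * p[i - w]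
--             if wj < i + 1:
--                 sum_total += sign * p[i - wj]
--             w += 3 * j + 1
--             j += 1
--             wj = w + j
--             sign *= -1
--         p.append(sum_total)
--
--     return p
-- ===== SOURCE B (Python) =====
-- def enum_partitions2(m: int):
--     # Top-down memoized recursion on the partition recurrence: a dict memo plus
--     # closed-form pentagonal bounds replaces A's bottom-up list loop with its
--     # incremental sign/w/j/wj state machine.
--     memo = {0: 1}
--
--     def p(n):
--         r = memo.get(n)
--         if r is not None:
--             return r
--         total = 0
--         k = 1
--         sign = 1
--         g1 = 1
--         mg = memo.get
--         while g1 <= n: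
--             v = mg(n - g1)
--             if v is None:
--                 v = p(n - g1)
--             total += sign * v
--             g2 = g1 + k
--             if g2 <= n:
--                 v = mg(n - g2)
--                 if v is None:
--                     v = p(n - g2)
--                 total += sign * v
--             sign = -sign
--             k += 1
--             g1 = k * (3 * k - 1) // 2
--         memo[n] = total
--         return total
--
--     return [p(n) for n in range(max(m, 0) + 1)]
-- ===== Notes on version B (the rewrite author's own statement) =====
-- stated objective: alternative
-- what changed: B is a top-down memoized recursion (a dict memo consulted first, recursive call as fallback, closed-form pentagonal bounds as loop guards) replacing A's bottom-up list-append loop with its incremental sign/w/j/wj state machine; same recurrence, inverted recursive decomposition.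
import Mathlib
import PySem

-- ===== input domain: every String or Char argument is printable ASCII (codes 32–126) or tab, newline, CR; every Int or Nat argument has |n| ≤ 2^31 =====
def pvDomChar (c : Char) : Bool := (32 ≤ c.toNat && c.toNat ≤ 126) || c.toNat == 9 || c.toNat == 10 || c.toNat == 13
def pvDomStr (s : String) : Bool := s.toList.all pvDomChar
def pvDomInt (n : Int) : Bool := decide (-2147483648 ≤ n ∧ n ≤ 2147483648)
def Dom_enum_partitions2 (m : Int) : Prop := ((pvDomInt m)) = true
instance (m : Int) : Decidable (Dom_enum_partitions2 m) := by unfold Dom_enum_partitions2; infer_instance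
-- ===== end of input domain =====

-- B inverts A's decomposition: a top-down memoized recursion (dict memo, closed-form
-- pentagonal bounds as loop guards) replaces A's bottom-up list-append loop with its
-- incremental sign/w/j/wj state machine; objective: alternative (no speed claim).

-- ===== PORT A =====
-- inner `while w < i + 1` loop of A; the fuel only bounds the iteration count
-- (the loop runs at most i times since w ≥ 1 grows by 3j+1 ≥ 4, so fuel i+1 is exact).
def enumPartLoopA (p : List Int) (i : Int) : Nat → Int → Int → Int → Int → Int → Int
  | 0, _, sum_total, _, _, _ => sum_total
  | fuel + 1, sign, sum_total, w, j, wj =>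
    if w < i + 1 then
      let s1 := sum_total + sign * (PySem.List.pyGet? p (i - w)).getD 0
      let s2 := if wj < i + 1 then s1 + sign * (PySem.List.pyGet? p (i - wj)).getD 0 else s1
      enumPartLoopA p i fuel (sign * -1) s2 (w + 3 * j + 1) (j + 1) (w + 3 * j + 1 + (j + 1))
    else sum_total

def enum_partitions2 (m : Int) : List Int :=
  (PySem.List.pyRange 1 (m + 1) 1).foldl
    (fun p i => p ++ [enumPartLoopA p i (i.toNat + 1) 1 0 1 1 2]) [1]

-- ===== PORT B =====
def pentG1 (k : Int) : Int := PySem.Int.floordiv (k * (3 * k - 1)) 2   -- k*(3*k-1)//2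

-- B's inner `while g1 <= n` loop; `f` is the recursive `p` (passed at lower fuel), threading the
-- memo dict; state is (total, k, sign, g1); each term is fetched from the memo (`mg`) with the
-- recursive call as fallback. The fuel only bounds the iteration count (k ≤ g1, so n+1 is exact).
def pLoopB (f : PySem.Dict Int Int → Int → Int × PySem.Dict Int Int) (n : Int) :
    Nat → PySem.Dict Int Int → Int → Int → Int → Int → Int × PySem.Dict Int Int
  | 0, memo, total, _, _, _ => (total, memo)
  | fuel + 1, memo, total, k, sign, g1 =>
    if g1 ≤ n then
      let r1 :=
        match memo.get? (n - g1) with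
        | some v => (v, memo)
        | none => f memo (n - g1)
      let total1 := total + sign * r1.1
      if g1 + k ≤ n then
        let r2 :=
          match r1.2.get? (n - (g1 + k)) with
          | some v => (v, r1.2)
          | none => f r1.2 (n - (g1 + k))
        pLoopB f n fuel r2.2 (total1 + sign * r2.1) (k + 1) (-sign) (pentG1 (k + 1))
      else
        pLoopB f n fuel r1.2 total1 (k + 1) (-sign) (pentG1 (k + 1))
    else (total, memo)

-- B's recursive `p(n)` with its memo dict threaded through; fuel n+1 suffices since every
-- recursive call drops n by at least 1.
def pFunB : Nat → PySem.Dict Int Int → Int → Int × PySem.Dict Int Int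
  | 0, memo, _ => (0, memo)
  | fuel + 1, memo, n =>
    match memo.get? n with
    | some r => (r, memo)
    | none =>
      let r := pLoopB (pFunB fuel) n (n.toNat + 1) memo 0 1 1 1
      (r.1, r.2.insert n r.1)

def enum_partitions2_alt (m : Int) : List Int :=
  ((PySem.List.pyRange 0 (max m 0 + 1) 1).foldl
    (fun (st : List Int × PySem.Dict Int Int) n =>
      let r := pFunB (n.toNat + 1) st.2 n
      (st.1 ++ [r.1], r.2))
    ([], PySem.Dict.ofList [(0, 1)])).1

-- ===== PRECONDITION & SPEC =====
def Spec_enum_partitions2 (m : Int) (out : List Int) : Prop := out = enum_partitions2_alt m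
instance (m : Int) (out : List Int) : Decidable (Spec_enum_partitions2 m out) := by unfold Spec_enum_partitions2; infer_instance

-- ===== CLAIM (what is proved, stated in full; the proofs are below) =====
def Claim_equal_enum_partitions2 : Prop := ∀ (m : Int), Dom_enum_partitions2 m → Spec_enum_partitions2 m (enum_partitions2 m)

-- ===== LEMMAS AND PROOFS =====

-- abbreviations for the two folds (proof-only)
def stepA (p : List Int) (i : Int) : List Int :=
  p ++ [enumPartLoopA p i (i.toNat + 1) 1 0 1 1 2]

def stepB (st : List Int × PySem.Dict Int Int) (n : Int) : List Int × PySem.Dict Int Int :=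
  let r := pFunB (n.toNat + 1) st.2 n
  (st.1 ++ [r.1], r.2)

def AfoldN (N : Nat) : List Int :=
  (PySem.List.pyRange 1 ((N : Int) + 1) 1).foldl stepA [1]

def BfoldN (N : Nat) : List Int × PySem.Dict Int Int :=
  (PySem.List.pyRange 0 ((N : Int) + 1) 1).foldl stepB ([], PySem.Dict.ofList [(0, 1)])

-- proof-only: the sign carried by B's loop at step k (A's `sign`), in closed form
def pentSign (k : Int) : Int := if k % 2 = 0 then -1 else 1

lemma two_mul_pentG1 (j : Int) : 2 * pentG1 j = j * (3 * j - 1) := by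
  obtain ⟨k, hk⟩ := Int.even_mul_succ_self j
  have hdvd : (2 : Int) ∣ j * (3 * j - 1) := ⟨k + j * (j - 1), by linear_combination hk⟩
  unfold pentG1
  rw [PySem.Int.floordiv_eq_ediv_of_pos (by norm_num)]
  exact Int.mul_ediv_cancel' hdvd

lemma pentG1_succ (j : Int) : pentG1 (j + 1) = pentG1 j + 3 * j + 1 := by
  have h1 := two_mul_pentG1 j
  have h2 := two_mul_pentG1 (j + 1)
  ring_nf at h1 h2 ⊢
  linarith

lemma pentG1_ge_self {j : Int} (hj : 1 ≤ j) : j ≤ pentG1 j := by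
  have h1 := two_mul_pentG1 j
  nlinarith

lemma pentSign_succ (j : Int) : pentSign (j + 1) = -pentSign j := by
  unfold pentSign
  by_cases h : j % 2 = 0
  · have h1 : (j + 1) % 2 = 1 := by omega
    simp [h, h1]
  · have h0 : j % 2 = 1 := by omega
    have h1 : (j + 1) % 2 = 0 := by omega
    simp [h0, h1]

lemma pFunB_succ (fuel : Nat) (memo : PySem.Dict Int Int) (n : Int) :
    pFunB (fuel + 1) memo n =
      match memo.get? n with
      | some r => (r, memo)
      | none =>
        ((pLoopB (pFunB fuel) n (n.toNat + 1) memo 0 1 1 1).1,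
          (pLoopB (pFunB fuel) n (n.toNat + 1) memo 0 1 1 1).2.insert n
            (pLoopB (pFunB fuel) n (n.toNat + 1) memo 0 1 1 1).1) := rfl

-- B's inner loop, when every memo lookup below i hits (so the recursive fallback is never
-- taken and the memo is untouched), runs A's inner loop: the loop states correspond via the
-- closed forms w = g1 = pentG1 k, wj = g1 + k, sign = pentSign k.
lemma loop_corr (f : PySem.Dict Int Int → Int → Int × PySem.Dict Int Int)
    (p : List Int) (i : Int) (memo : PySem.Dict Int Int)
    (hmem : ∀ x : Int, 0 ≤ x → x < i → memo.get? x = some ((PySem.List.pyGet? p x).getD 0)) :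
    ∀ (fuel : Nat) (k acc : Int), 1 ≤ k →
      pLoopB f i fuel memo acc k (pentSign k) (pentG1 k) =
        (enumPartLoopA p i fuel (pentSign k) acc (pentG1 k) k (pentG1 k + k), memo) := by
  intro fuel
  induction fuel with
  | zero => intro k acc _; rfl
  | succ fuel ih =>
    intro k acc hk
    have hkg : k ≤ pentG1 k := pentG1_ge_self hk
    simp only [pLoopB, enumPartLoopA]
    by_cases h1 : pentG1 k ≤ i
    · rw [if_pos h1, if_pos (show pentG1 k < i + 1 by omega)]
      have hx1 := hmem (i - pentG1 k) (by omega) (by omega)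
      rw [hx1]
      have hsgn : -pentSign k = pentSign (k + 1) := (pentSign_succ k).symm
      have hsgn' : pentSign k * -1 = pentSign (k + 1) := by rw [← hsgn]; ring
      have hrec : pentG1 k + 3 * k + 1 = pentG1 (k + 1) := (pentG1_succ k).symm
      by_cases h2 : pentG1 k + k ≤ i
      · rw [if_pos h2, if_pos (show pentG1 k + k < i + 1 by omega)]
        have hx2 := hmem (i - (pentG1 k + k)) (by omega) (by omega)
        simp only
        rw [hx2]
        simp only
        rw [hsgn, ih (k + 1) _ (by omega), hrec, hsgn']
      · rw [if_neg h2, if_neg (show ¬ pentG1 k + k < i + 1 by omega)]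
        simp only
        rw [hsgn, ih (k + 1) _ (by omega), hrec, hsgn']
    · rw [if_neg h1, if_neg (show ¬ pentG1 k < i + 1 by omega)]

lemma AfoldN_succ (N : Nat) : AfoldN (N + 1) = stepA (AfoldN N) ((N : Int) + 1) := by
  unfold AfoldN
  have h : ((N + 1 : Nat) : Int) + 1 = (((N : Int) + 1) + 1) := by push_cast; ring
  rw [h, PySem.List.pyRange_one_succ_right (by omega), List.foldl_append]
  rfl

lemma AfoldN_length (N : Nat) : (AfoldN N).length = N + 1 := by
  induction N with
  | zero => decide
  | succ N ih =>
    rw [AfoldN_succ, stepA]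
    simp [ih]

-- the joint invariant: B's fold carries A's list and a memo of exactly its entries 0..N
lemma fold_inv (N : Nat) :
    (BfoldN N).1 = AfoldN N ∧
    ∀ x : Int, (BfoldN N).2.get? x =
      if 0 ≤ x ∧ x ≤ (N : Int) then some ((PySem.List.pyGet? (AfoldN N) x).getD 0) else none := by
  induction N with
  | zero =>
    have hB : BfoldN 0 = ([1], PySem.Dict.ofList [(0, 1)]) := by decide
    have hA : AfoldN 0 = [1] := by decide
    refine ⟨by rw [hB, hA], ?_⟩
    intro x
    rw [hB, hA]
    by_cases hx : x = 0
    · subst hx; decide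
    · have hc : ¬ (0 ≤ x ∧ x ≤ ((0 : Nat) : Int)) := by omega
      rw [if_neg hc]
      show (PySem.Dict.ofList [((0 : Int), (1 : Int))]).get? x = none
      rw [show (PySem.Dict.ofList [((0 : Int), (1 : Int))]) = PySem.Dict.empty.insert 0 1 from by decide,
        PySem.Dict.get?_insert_of_ne PySem.Dict.empty 1 hx, PySem.Dict.get?_empty]
  | succ N ih =>
    obtain ⟨ihL, ihM⟩ := ih
    have hsplit : BfoldN (N + 1) = stepB (BfoldN N) ((N : Int) + 1) := by
      unfold BfoldN
      have h : ((N + 1 : Nat) : Int) + 1 = (((N : Int) + 1) + 1) := by push_cast; ring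
      rw [h, PySem.List.pyRange_one_succ_right (by omega), List.foldl_append]
      rfl
    set i : Int := (N : Int) + 1 with hi
    have htN : i.toNat = N + 1 := by omega
    have hlen : ((AfoldN N).length : Int) = i := by rw [AfoldN_length]; omega
    have hloop := loop_corr (pFunB (N + 1)) (AfoldN N) i (BfoldN N).2
      (fun x hx0 hxi => by rw [ihM x, if_pos ⟨hx0, by omega⟩]) (N + 2) 1 0 (by omega)
    have hpent1 : pentG1 1 = 1 := by decide
    have hpsign1 : pentSign 1 = 1 := by decide
    rw [hpent1, hpsign1] at hloop
    norm_num at hloop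
    set v : Int := enumPartLoopA (AfoldN N) i (N + 2) 1 0 1 1 2 with hv
    have hstep : stepB (BfoldN N) i = (AfoldN N ++ [v], (BfoldN N).2.insert i v) := by
      unfold stepB
      rw [htN]
      have hpf : pFunB (N + 2) (BfoldN N).2 i = (v, (BfoldN N).2.insert i v) := by
        rw [show N + 2 = (N + 1) + 1 from rfl, pFunB_succ, ihM i,
          if_neg (show ¬ (0 ≤ i ∧ i ≤ (N : Int)) by omega)]
        simp only [htN]
        rw [hloop]
      rw [hpf, ihL]
    have hAsucc : AfoldN (N + 1) = AfoldN N ++ [v] := by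
      rw [AfoldN_succ, stepA, htN]
    constructor
    · rw [hsplit, hstep, hAsucc]
    · intro x
      rw [hsplit, hstep]
      simp only [PySem.Dict.get?_insert]
      by_cases hx : x = i
      · subst hx
        rw [if_pos rfl, if_pos (by constructor <;> omega)]
        have : PySem.List.pyGet? (AfoldN (N + 1)) i = some v := by
          rw [hAsucc, ← hlen]
          exact PySem.List.pyGet?_append_length (AfoldN N) [] v
        rw [this]
        rfl
      · rw [if_neg hx, ihM x]
        by_cases hx2 : 0 ≤ x ∧ x ≤ (N : Int)
        · rw [if_pos hx2, if_pos (by omega)]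
          have hget : PySem.List.pyGet? (AfoldN (N + 1)) x = PySem.List.pyGet? (AfoldN N) x := by
            have hx0' : (0 : Int) ≤ x := by omega
            rw [hAsucc, PySem.List.pyGet?_of_nonneg (AfoldN N ++ [v]) hx0',
              PySem.List.pyGet?_of_nonneg (AfoldN N) hx0',
              List.getElem?_append_left (by rw [AfoldN_length]; omega)]
          rw [hget]
        · rw [if_neg hx2, if_neg (by omega)]

-- ===== VERDICT (by name: the statement is the Claim_ definition above) =====
theorem enum_partitions2_spec : Claim_equal_enum_partitions2 := by
  intro m _
  unfold Spec_enum_partitions2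
  by_cases hm : 0 ≤ m
  · have hA : enum_partitions2 m = AfoldN m.toNat := by
      unfold enum_partitions2 AfoldN
      rw [show ((m.toNat : Nat) : Int) + 1 = m + 1 by omega]
      rfl
    have hB : enum_partitions2_alt m = (BfoldN m.toNat).1 := by
      unfold enum_partitions2_alt BfoldN
      rw [show max m 0 + 1 = ((m.toNat : Nat) : Int) + 1 by omega]
      rfl
    rw [hA, hB, (fold_inv m.toNat).1]
  · have hA : enum_partitions2 m = [1] := by
      unfold enum_partitions2
      rw [PySem.List.pyRange_one_eq_nil (by omega)]
      rfl
    have hB : enum_partitions2_alt m = (BfoldN 0).1 := by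
      unfold enum_partitions2_alt BfoldN
      rw [show max m 0 + 1 = ((0 : Nat) : Int) + 1 by omega]
      rfl
    rw [hA, hB, (fold_inv 0).1]
    decide
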